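-- pv_equiv track=rewrite | github.com/jaychung003/virtual-nutritionist | backend/services/menu_photo_service.py | deduplicate_menu_items
-- ===== SOURCE A (Python) =====
-- from typing import List, Dict, Optional, Tuple
--
-- def deduplicate_menu_items(items: List[Dict]) -> List[Dict]:
--     """
--     Remove duplicate menu items (same item from multiple photos).
--
--     Args:
--         items: List of menu item dictionaries
--
--     Returns:
--         Deduplicated list of menu items
--     """
--     seen_items = {}
--
--     for item in items:
--         # Use lowercase name as key for deduplication
--         key = item["name"].lower().strip()
--
--         if key not in seen_items:
--             seen_items[key] = item
--         else:
--             # Keep the item with more detailed information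
--             existing = seen_items[key]
--             if len(item.get("notes", "")) > len(existing.get("notes", "")):
--                 seen_items[key] = item
--
--     return list(seen_items.values())
-- ===== SOURCE B (Python) =====
-- def deduplicate_menu_items(items):
--     """Dictionary-free worklist algorithm: repeatedly peel off the first
--     remaining item's key, pick the best-noted item of that key by a scan,
--     and drop that whole key from the worklist."""
--     result = []
--     rest = items
--     while rest:
--         head, tail = rest[0], rest[1:]
--         key = head["name"].lower().strip()
--         best = head
--         for it in tail:
--             if it["name"].lower().strip() == key and len(it.get("notes", "")) > len(best.get("notes", "")):
--                 best = it
--         result.append(best)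
--         rest = [it for it in tail if it["name"].lower().strip() != key]
--     return result
-- ===== Notes on version B (the rewrite author's own statement) =====
-- stated objective: alternative
-- what changed: A keeps a best-so-far dict over one pass; B uses no dictionary at all: a worklist loop that peels off the first remaining item's normalized key, scans the rest for the item with strictly longer notes, and filters that key out of the worklist.
-- outside the precondition, e.g. on deduplicate_menu_items([{'notes': 'x'}]): A raises KeyError, B raises KeyError
import Mathlib
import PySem

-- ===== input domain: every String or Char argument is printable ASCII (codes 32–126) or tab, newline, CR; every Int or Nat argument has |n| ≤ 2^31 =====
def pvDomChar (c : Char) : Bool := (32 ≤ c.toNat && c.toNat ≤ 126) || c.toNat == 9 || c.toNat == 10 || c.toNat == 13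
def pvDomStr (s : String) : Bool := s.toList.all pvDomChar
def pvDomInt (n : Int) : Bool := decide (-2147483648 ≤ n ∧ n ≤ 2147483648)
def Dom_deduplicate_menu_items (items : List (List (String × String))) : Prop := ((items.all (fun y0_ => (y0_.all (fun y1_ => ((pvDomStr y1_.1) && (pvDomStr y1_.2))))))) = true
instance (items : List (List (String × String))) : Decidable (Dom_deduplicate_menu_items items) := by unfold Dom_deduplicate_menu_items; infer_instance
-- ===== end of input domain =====

-- B replaces A's dict-based single pass by a dictionary-free worklist algorithm (peel first key, scan for best notes, filter the key out); alternative decomposition, quadratic worst case.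


-- ===== PORT A =====
-- key = item["name"].lower().strip(); exact under Pre_ (each item has a "name" key; KeyError excluded by Pre_)
def pvKey (item : List (String × String)) : String :=
  PySem.Str.strip (PySem.Str.lower ((PySem.Dict.mk item).getD "name" ""))

-- len(item.get("notes", ""))
def pvNotesLen (item : List (String × String)) : Int :=
  PySem.Str.len ((PySem.Dict.mk item).getD "notes" "")

-- one iteration of A's loop over `seen_items`
def pvStepA (seen : PySem.Dict String (List (String × String))) (item : List (String × String)) :
    PySem.Dict String (List (String × String)) :=
  let key := pvKey item
  if seen.contains key = false then seen.insert key item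
  else
    let existing := seen.getD key []
    if pvNotesLen item > pvNotesLen existing then seen.insert key item else seen

def deduplicate_menu_items (items : List (List (String × String))) : List (List (String × String)) :=
  (items.foldl pvStepA PySem.Dict.empty).values

-- ===== PORT B =====
-- Source B's while-loop over the shrinking worklist `rest`, as the obvious recursion:
-- take the head's key, scan the tail for a strictly better-noted same-key item, drop the key, recurse.
def deduplicate_menu_items_alt : List (List (String × String)) → List (List (String × String))
  | [] => []
  | x :: xs =>
    let k := pvKey x
    let best := xs.foldl (fun b it => if pvKey it == k ∧ pvNotesLen it > pvNotesLen b then it else b) x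
    best :: deduplicate_menu_items_alt (xs.filter (fun it => !(pvKey it == k)))
termination_by items => items.length
decreasing_by
  simp only [List.length_cons, List.length_unattach]
  exact Nat.lt_succ_of_le (le_trans (List.length_filter_le _ _) (by simp))

-- ===== PRECONDITION & SPEC =====
-- Pre_ excludes exactly the items lacking a "name" key, on which the Python A (and B) raise KeyError.
def Pre_deduplicate_menu_items (items : List (List (String × String))) : Prop :=
  (items.all (fun it => it.any (fun p => p.1 == "name"))) = true
instance (items : List (List (String × String))) : Decidable (Pre_deduplicate_menu_items items) := by
  unfold Pre_deduplicate_menu_items; infer_instance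

def pvWitness_deduplicate_menu_items : (List (List (String × String))) :=
  [[("name", " Pizza"), ("notes", "big")], [("name", "pizza"), ("notes", "extra large")], [("name", "Soup")]]

def Spec_deduplicate_menu_items (items : List (List (String × String))) (out : List (List (String × String))) : Prop := out = deduplicate_menu_items_alt items
instance (items : List (List (String × String))) (out : List (List (String × String))) : Decidable (Spec_deduplicate_menu_items items out) := by unfold Spec_deduplicate_menu_items; infer_instance

-- ===== CLAIM (what is proved, stated in full; the proofs are below) =====
def Claim_equal_deduplicate_menu_items : Prop := ∀ (items : List (List (String × String))), Dom_deduplicate_menu_items items → Pre_deduplicate_menu_items items → Spec_deduplicate_menu_items items (deduplicate_menu_items items)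

-- ===== LEMMAS AND PROOFS =====

-- proof-only common form: the best-so-far fold B runs over a tail
def pvUpd (k : String) (b : List (String × String)) (xs : List (List (String × String))) :
    List (String × String) :=
  xs.foldl (fun b it => if pvKey it == k ∧ pvNotesLen it > pvNotesLen b then it else b) b

-- proof-only common form: the deduplicated (key, best item) pairs produced after excluding keys in s
def pvNewPart : List (List (String × String)) → List String → List (String × (List (String × String)))
  | [], _ => []
  | x :: xs, s =>
    if s.contains (pvKey x) then pvNewPart xs s
    else (pvKey x, pvUpd (pvKey x) x xs) :: pvNewPart xs (pvKey x :: s)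

lemma pvNewPart_congr (xs : List (List (String × String))) :
    ∀ s₁ s₂ : List String, (∀ a, a ∈ s₁ ↔ a ∈ s₂) → pvNewPart xs s₁ = pvNewPart xs s₂ := by
  induction xs with
  | nil => intro _ _ _; rfl
  | cons x xs ih =>
    intro s₁ s₂ h
    simp only [pvNewPart]
    have hc : s₁.contains (pvKey x) = s₂.contains (pvKey x) := by
      by_cases hm : pvKey x ∈ s₁
      · simp [hm, (h _).mp hm]
      · have hm2 : pvKey x ∉ s₂ := fun z => hm ((h _).mpr z)
        simp [hm, hm2]
    rw [hc]
    by_cases hc2 : s₂.contains (pvKey x) = true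
    · simp only [hc2, if_true]; exact ih s₁ s₂ h
    · simp only [hc2, if_false, Bool.false_eq_true]
      refine congrArg _ (ih _ _ ?_)
      intro a; simp only [List.mem_cons]
      exact or_congr Iff.rfl (h a)

lemma pvUpd_cons (k : String) (b x : List (String × String)) (xs : List (List (String × String))) :
    pvUpd k b (x :: xs) = pvUpd k (if pvKey x == k ∧ pvNotesLen x > pvNotesLen b then x else b) xs := by
  simp only [pvUpd, List.foldl_cons]

lemma pvNewPart_cons_true (x : List (String × String)) (xs : List (List (String × String)))
    (s : List String) (h : s.contains (pvKey x) = true) :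
    pvNewPart (x :: xs) s = pvNewPart xs s := by
  simp only [pvNewPart, h, if_true]

lemma pvNewPart_cons_false (x : List (String × String)) (xs : List (List (String × String)))
    (s : List String) (h : s.contains (pvKey x) = false) :
    pvNewPart (x :: xs) s = (pvKey x, pvUpd (pvKey x) x xs) :: pvNewPart xs (pvKey x :: s) := by
  simp only [pvNewPart, h, Bool.false_eq_true, if_false]

lemma pvUpd_filter (k k' : String) (hne : k' ≠ k) (xs : List (List (String × String))) :
    ∀ b, pvUpd k' b (xs.filter (fun it => !(pvKey it == k))) = pvUpd k' b xs := by
  induction xs with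
  | nil => intro b; rfl
  | cons x xs ih =>
    intro b
    by_cases hx : (pvKey x == k) = true
    · have hf : (x :: xs).filter (fun it => !(pvKey it == k)) =
          xs.filter (fun it => !(pvKey it == k)) := by
        rw [List.filter_cons]; simp [hx]
      rw [hf, ih b, pvUpd_cons,
        if_neg (fun h => hne (((eq_of_beq h.1).symm.trans (eq_of_beq hx))))]
    · have hf : (x :: xs).filter (fun it => !(pvKey it == k)) =
          x :: xs.filter (fun it => !(pvKey it == k)) := by
        rw [List.filter_cons]; simp [hx]
      rw [hf, pvUpd_cons, pvUpd_cons, ih]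

lemma pvNewPart_filter (xs : List (List (String × String))) :
    ∀ (k : String) (s : List String),
      pvNewPart xs (k :: s) = pvNewPart (xs.filter (fun it => !(pvKey it == k))) s := by
  induction xs with
  | nil => intro k s; rfl
  | cons x xs ih =>
    intro k s
    by_cases hx : pvKey x = k
    · -- head has the excluded key: skipped on the left, filtered out on the right
      have hf : (x :: xs).filter (fun it => !(pvKey it == k)) =
          xs.filter (fun it => !(pvKey it == k)) := by
        rw [List.filter_cons]; simp [hx]
      rw [pvNewPart_cons_true x xs (k :: s) (by simp [hx]), hf, ih k s]
    · have hbx : (pvKey x == k) = false := by simpa using hx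
      have hf : (x :: xs).filter (fun it => !(pvKey it == k)) =
          x :: xs.filter (fun it => !(pvKey it == k)) := by
        rw [List.filter_cons]; simp [hbx]
      by_cases hs : pvKey x ∈ s
      · rw [pvNewPart_cons_true x xs (k :: s) (by simp [hs]), hf,
          pvNewPart_cons_true x _ s (by simp [hs]), ih k s]
      · rw [pvNewPart_cons_false x xs (k :: s) (by simp [hx, hs]), hf,
          pvNewPart_cons_false x _ s (by simp [hs])]
        rw [pvUpd_filter k (pvKey x) hx xs x,
          pvNewPart_congr xs (pvKey x :: k :: s) (k :: pvKey x :: s) (fun a => by simp only [List.mem_cons]; exact or_left_comm),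
          ih k (pvKey x :: s)]

lemma alt_eq_newPart_aux : ∀ (n : Nat) (xs : List (List (String × String))), xs.length ≤ n →
    deduplicate_menu_items_alt xs = (pvNewPart xs []).map Prod.snd := by
  intro n
  induction n with
  | zero =>
    intro xs h
    have hx : xs = [] := List.eq_nil_of_length_eq_zero (Nat.le_zero.mp h)
    subst hx
    simp [deduplicate_menu_items_alt, pvNewPart]
  | succ n ih =>
    intro xs h
    cases xs with
    | nil => simp [deduplicate_menu_items_alt, pvNewPart]
    | cons x xs =>
      rw [deduplicate_menu_items_alt.eq_def]
      dsimp only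
      rw [pvNewPart_cons_false x xs [] (by simp), List.map_cons]
      refine congrArg₂ List.cons rfl ?_
      rw [pvNewPart_filter xs (pvKey x) [],
        ← ih _ (le_trans (List.length_filter_le _ _) (Nat.le_of_succ_le_succ h))]

lemma alt_eq_newPart (xs : List (List (String × String))) :
    deduplicate_menu_items_alt xs = (pvNewPart xs []).map Prod.snd :=
  alt_eq_newPart_aux xs.length xs (le_refl _)

-- A's dict fold, characterized: existing entries get updated by pvUpd, fresh keys append pvNewPart
lemma foldA_items (xs : List (List (String × String))) :
    ∀ d : PySem.Dict String (List (String × String)), d.keys.Nodup →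
      (xs.foldl pvStepA d).items =
        d.items.map (fun p => (p.1, pvUpd p.1 p.2 xs)) ++ pvNewPart xs d.keys := by
  induction xs with
  | nil =>
    intro d _
    simp [pvNewPart, pvUpd]
  | cons x xs ih =>
    intro d hnd
    by_cases hc : d.contains (pvKey x) = true
    · -- key already present
      have hkmem : pvKey x ∈ d.keys := (PySem.Dict.contains_iff_mem_keys d _).mp hc
      have hstep : pvStepA d x =
          if pvNotesLen x > pvNotesLen (d.getD (pvKey x) []) then d.insert (pvKey x) x else d := by
        simp [pvStepA, hc]
      have hmap : ∀ d' : PySem.Dict String (List (String × String)),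
          d'.items = (if pvNotesLen x > pvNotesLen (d.getD (pvKey x) []) then d.insert (pvKey x) x else d).items →
          d'.items.map (fun p => (p.1, pvUpd p.1 p.2 xs)) =
          d.items.map (fun p => (p.1, pvUpd p.1 p.2 (x :: xs))) := by
        intro d' hd'
        by_cases hgt : pvNotesLen x > pvNotesLen (d.getD (pvKey x) [])
        · rw [hd', if_pos hgt, PySem.Dict.items_insert_of_contains _ _ hc, List.map_map]
          apply List.map_congr_left
          intro p hp
          have hval : d.getD p.1 [] = p.2 := PySem.Dict.getD_of_mem_items d hp hnd []
          by_cases hpk : (p.1 == pvKey x) = true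
          · have hp1 : p.1 = pvKey x := eq_of_beq hpk
            have hgt' : pvNotesLen x > pvNotesLen p.2 := by
              rw [← hval, hp1]; exact hgt
            simp only [Function.comp, hpk, if_pos, pvUpd_cons]
            rw [if_pos ⟨by simp [hp1], hgt'⟩, hp1]
          · have hne : ¬ (pvKey x == p.1) = true := fun hh => hpk (by simp [eq_of_beq hh])
            simp only [Function.comp, hpk, Bool.false_eq_true, if_false, pvUpd_cons]
            rw [if_neg (fun hh => hne hh.1)]
        · rw [hd', if_neg hgt]
          apply List.map_congr_left
          intro p hp
          have hval : d.getD p.1 [] = p.2 := PySem.Dict.getD_of_mem_items d hp hnd []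
          rw [pvUpd_cons]
          by_cases hpk : (p.1 == pvKey x) = true
          · have hp1 : p.1 = pvKey x := eq_of_beq hpk
            rw [if_neg (fun hh => hgt (by rw [← hp1, hval]; exact hh.2))]
          · have hne : ¬ (pvKey x == p.1) = true := fun hh => hpk (by simp [eq_of_beq hh])
            rw [if_neg (fun hh => hne hh.1)]
      by_cases hgt : pvNotesLen x > pvNotesLen (d.getD (pvKey x) [])
      · have hstep' : pvStepA d x = d.insert (pvKey x) x := by rw [hstep, if_pos hgt]
        have hnd' : (d.insert (pvKey x) x).keys.Nodup := PySem.Dict.nodup_keys_insert d _ _ hnd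
        have hkeys' : (d.insert (pvKey x) x).keys = d.keys :=
          PySem.Dict.keys_insert_of_contains d _ hc
        rw [List.foldl_cons, hstep', ih _ hnd', hkeys',
          hmap _ (by rw [if_pos hgt]),
          pvNewPart_cons_true x xs d.keys (by simp [hkmem])]
      · have hstep' : pvStepA d x = d := by rw [hstep, if_neg hgt]
        rw [List.foldl_cons, hstep', ih _ hnd, hmap _ (by rw [if_neg hgt]),
          pvNewPart_cons_true x xs d.keys (by simp [hkmem])]
    · -- fresh key
      have hc' : d.contains (pvKey x) = false := by simpa using hc
      have hkmem : pvKey x ∉ d.keys := fun hh => hc ((PySem.Dict.contains_iff_mem_keys d _).mpr hh)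
      have hstep' : pvStepA d x = d.insert (pvKey x) x := by simp [pvStepA, hc']
      have hnd' : (d.insert (pvKey x) x).keys.Nodup := PySem.Dict.nodup_keys_insert d _ _ hnd
      rw [List.foldl_cons, hstep', ih _ hnd',
        PySem.Dict.items_insert_of_not_contains _ _ hc',
        PySem.Dict.keys_insert_of_not_contains _ _ hc']
      rw [List.map_append, List.append_assoc]
      refine congrArg₂ List.append ?_ ?_
      · apply List.map_congr_left
        intro p hp
        have hne : p.1 ≠ pvKey x := by
          intro he
          exact hkmem (he ▸ PySem.Dict.mem_keys_of_mem_items d hp)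
        rw [pvUpd_cons, if_neg (fun hh => hne (eq_of_beq hh.1).symm)]
      · rw [pvNewPart_cons_false x xs d.keys (by simp [hkmem]), List.map_cons, List.map_nil,
          List.singleton_append,
          pvNewPart_congr xs (d.keys ++ [pvKey x]) (pvKey x :: d.keys) (fun a => by simp only [List.mem_append, List.mem_cons, List.not_mem_nil, or_false]; exact or_comm)]

-- ===== VERDICT (by name: the statement is the Claim_ definition above) =====
theorem deduplicate_menu_items_spec : Claim_equal_deduplicate_menu_items := by
  intro items _ _
  unfold Spec_deduplicate_menu_items deduplicate_menu_items
  rw [alt_eq_newPart]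
  have h := foldA_items items PySem.Dict.empty (by simp [PySem.Dict.empty, PySem.Dict.keys])
  simp only [PySem.Dict.values, h]
  simp [PySem.Dict.empty, PySem.Dict.keys]
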